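-- pv_equiv track=rewrite | github.com/AntonioCesar001/aurion-nexus | infrastructure/wikimind-core/src/wikimind/services/taxonomy.py | _exceeds_max_depth
-- ===== SOURCE A (Python) =====
-- def _exceeds_max_depth(
--     parent_mapping: dict[str, str | None],
--     max_depth: int,
-- ) -> bool:
--     """Check if any chain in the parent mapping exceeds max_depth.
--
--     Args:
--         parent_mapping: Mapping of concept name to parent name (or None).
--         max_depth: Maximum allowed hierarchy depth.
--
--     Returns:
--         True if any chain exceeds max_depth levels.
--     """
--     for name in parent_mapping:
--         depth = 0
--         current: str | None = name
--         while current is not None: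
--             current = parent_mapping.get(current)
--             depth += 1
--             if depth > max_depth:
--                 return True
--     return False
-- ===== SOURCE B (Python) =====
-- def _exceeds_max_depth(parent_mapping, max_depth):
--     """Memoized depth-to-root per node, with cycle detection."""
--     memo = {}  # node -> exact chain length (number of .get steps until None)
--     for name in parent_mapping:
--         path = []
--         on_path = set()
--         cur = name
--         while cur is not None and cur not in memo:
--             if cur in on_path:
--                 return True  # cycle: chain never terminates, exceeds any depth
--             on_path.add(cur)
--             path.append(cur)
--             cur = parent_mapping.get(cur)
--         depth = 0 if cur is None else memo[cur]
--         for node in reversed(path):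
--             depth += 1
--             memo[node] = depth
--         if memo[name] > max_depth:
--             return True
--     return False
-- ===== Notes on version B (the rewrite author's own statement) =====
-- stated objective: alternative
-- what changed: Instead of re-walking every parent chain from scratch bounded only by max_depth, B memoizes each node's exact depth-to-root in a dict and detects cycles with an on-path set, so every node is walked once.
import Mathlib
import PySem

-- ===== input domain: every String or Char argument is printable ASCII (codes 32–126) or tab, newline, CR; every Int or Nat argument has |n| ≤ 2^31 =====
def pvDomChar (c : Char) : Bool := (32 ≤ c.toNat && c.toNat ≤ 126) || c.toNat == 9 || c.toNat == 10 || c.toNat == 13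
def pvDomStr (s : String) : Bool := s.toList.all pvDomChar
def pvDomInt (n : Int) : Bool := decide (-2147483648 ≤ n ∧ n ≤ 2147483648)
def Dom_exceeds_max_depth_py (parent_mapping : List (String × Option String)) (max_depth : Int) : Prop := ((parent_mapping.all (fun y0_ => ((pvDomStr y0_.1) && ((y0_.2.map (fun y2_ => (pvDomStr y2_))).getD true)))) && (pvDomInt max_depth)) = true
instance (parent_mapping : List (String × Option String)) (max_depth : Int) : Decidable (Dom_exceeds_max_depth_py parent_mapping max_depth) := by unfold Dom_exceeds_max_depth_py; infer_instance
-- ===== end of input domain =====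

-- B memoizes each node's exact chain length (with cycle detection) instead of re-walking every chain step-bounded by max_depth, as A does.

-- ===== PORT A =====
-- the 'while current is not None' loop: 'current = parent_mapping.get(current)' is first-match
-- association-list lookup (the keys come from a Python dict, hence are distinct); the loop runs at
-- most max_depth+1 times (it returns True when depth > max_depth), hence the termination measure.
def aloop (pm : List (String × Option String)) (max_depth : Int) (current : Option String) (depth : Int) : Bool :=
  match current with
  | none => false
  | some c =>
      let current' := (List.lookup c pm).join    -- parent_mapping.get(current): None if missing or stored None
      if depth + 1 > max_depth then true
      else aloop pm max_depth current' (depth + 1)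
termination_by (max_depth - depth).toNat
decreasing_by omega

def exceeds_max_depth_py (parent_mapping : List (String × Option String)) (max_depth : Int) : Bool :=
  parent_mapping.any (fun kv => aloop parent_mapping max_depth (some kv.1) 0)

-- ===== PORT B =====
-- the 'while cur is not None and cur not in memo' loop of Source B; fuel = pm.length + 2 is an upper
-- bound on the iterations (path holds distinct nodes, all but the last being keys of pm), proved
-- below; the fuel-exhaustion branch is unreachable.  'cur in on_path' is membership in path (the
-- Python set on_path always holds exactly the elements of path).
def bwalk (pm : List (String × Option String)) (memo : List (String × Int)) :
    Nat → Option String → List String → Option (Option String × List String)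
  | 0, _, _ => none
  | fuel+1, cur, path =>
    match cur with
    | none => some (none, path)
    | some c =>
      if (List.lookup c memo).isSome then some (some c, path)
      else if c ∈ path then none        -- cycle: 'return True'
      else bwalk pm memo fuel ((List.lookup c pm).join) (path ++ [c])

-- 'for node in reversed(path): depth += 1; memo[node] = depth' (called on path.reverse; the
-- inserted keys are fresh, so prepending to the association list is the dict update)
def bassignRev : List String → Int → List (String × Int) → List (String × Int) × Int
  | [], depth, memo => (memo, depth)
  | node :: rest, depth, memo => bassignRev rest (depth + 1) ((node, depth + 1) :: memo)

-- the 'for name in parent_mapping' loop of Source B, carrying memo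
def bprocess (pm : List (String × Option String)) (max_depth : Int) :
    List (String × Option String) → List (String × Int) → Bool
  | [], _ => false
  | (name, _) :: rest, memo =>
    match bwalk pm memo (pm.length + 2) (some name) [] with
    | none => true
    | some (cur, path) =>
      let depth0 : Int := match cur with
        | none => 0
        | some c => (List.lookup c memo).getD 0   -- memo[cur]; always present here (proved below)
      let memo' := (bassignRev path.reverse depth0 memo).1
      if (List.lookup name memo').getD 0 > max_depth then true   -- memo[name]; always present here
      else bprocess pm max_depth rest memo'

def exceeds_max_depth_py_alt (parent_mapping : List (String × Option String)) (max_depth : Int) : Bool :=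
  bprocess parent_mapping max_depth parent_mapping []

-- ===== PRECONDITION & SPEC =====
def Spec_exceeds_max_depth_py (parent_mapping : List (String × Option String)) (max_depth : Int) (out : Bool) : Prop := out = exceeds_max_depth_py_alt parent_mapping max_depth
instance (parent_mapping : List (String × Option String)) (max_depth : Int) (out : Bool) : Decidable (Spec_exceeds_max_depth_py parent_mapping max_depth out) := by unfold Spec_exceeds_max_depth_py; infer_instance

-- ===== CLAIM (what is proved, stated in full; the proofs are below) =====
def Claim_equal_exceeds_max_depth_py : Prop := ∀ (parent_mapping : List (String × Option String)) (max_depth : Int), Dom_exceeds_max_depth_py parent_mapping max_depth → Spec_exceeds_max_depth_py parent_mapping max_depth (exceeds_max_depth_py parent_mapping max_depth)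

-- ===== LEMMAS AND PROOFS =====

-- one parent step on Option String: gstep (some c) = parent_mapping.get(c), gstep none = none
def gstep (pm : List (String × Option String)) (o : Option String) : Option String :=
  o.bind (fun c => (List.lookup c pm).join)

-- the chain from x after n steps
def it (pm : List (String × Option String)) (n : Nat) (x : String) : Option String :=
  (gstep pm)^[n] (some x)

-- A's per-key verdict, in closed form
def alive (pm : List (String × Option String)) (m : Int) (x : String) : Bool :=
  ((gstep pm)^[m.toNat] (some x)).isSome

-- "the chain from x dies exactly at step v" (v = exact chain length; B's memo values)
def Dies (pm : List (String × Option String)) (x : String) (v : Int) : Prop :=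
  ∀ t : Nat, (it pm t x = none ↔ v ≤ (t : Int))

def MemoInv (pm : List (String × Option String)) (memo : List (String × Int)) : Prop :=
  ∀ x v, List.lookup x memo = some v → Dies pm x v

-- path holds the successive iterates of name
def Chainpath (pm : List (String × Option String)) (name : String) (path : List String) : Prop :=
  ∀ i (h : i < path.length), some path[i] = it pm i name



theorem iterate_none (pm : List (String × Option String)) (n : Nat) :
    (gstep pm)^[n] none = none :=
  Function.iterate_fixed rfl n

theorem aloop_eq (pm : List (String × Option String)) (m : Int) :
    ∀ (n : Nat) (cur : Option String) (depth : Int), (m - depth).toNat = n →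
      aloop pm m cur depth = ((gstep pm)^[n] cur).isSome := by
  intro n
  induction n with
  | zero =>
    intro cur depth h
    cases cur with
    | none => simp [aloop]
    | some c =>
      have hgt : depth + 1 > m := by omega
      rw [aloop]
      simp [hgt]
  | succ k ih =>
    intro cur depth h
    cases cur with
    | none => simp [aloop, iterate_none]
    | some c =>
      have hle : ¬ (depth + 1 > m) := by omega
      rw [aloop]
      simp only [hle, if_false]
      rw [Function.iterate_succ_apply]
      have hg : gstep pm (some c) = (List.lookup c pm).join := rfl
      rw [hg]
      exact ih ((List.lookup c pm).join) (depth + 1) (by omega)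

theorem dies_pos (pm : List (String × Option String)) (x : String) (v : Int)
    (h : Dies pm x v) : 1 ≤ v := by
  have h0 := h 0
  simp [it] at h0
  omega

theorem alive_iff_dies (pm : List (String × Option String)) (m : Int) (x : String) (v : Int)
    (h : Dies pm x v) : alive pm m x = decide (m < v) := by
  have hv1 := dies_pos pm x v h
  have ht := h m.toNat
  simp only [it] at ht
  unfold alive
  rcases hx : (gstep pm)^[m.toNat] (some x) with _ | y
  · have h1 : v ≤ (m.toNat : Int) := ht.mp hx
    have h2 : ¬ (m < v) := by omega
    simp [h2]
  · have h2 : ¬ v ≤ (m.toNat : Int) := fun hc => by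
      have h3 := ht.mpr hc
      rw [hx] at h3
      simp at h3
    have h4 : m < v := by omega
    simp [h4]

theorem not_fin_of_repeat (pm : List (String × Option String)) (name : String)
    (j len : Nat) (hlt : j < len) (heq : it pm j name = it pm len name)
    (hsome : ∀ i, i < len → (it pm i name).isSome) :
    ∀ n, (it pm n name).isSome := by
  have shift : ∀ s, (gstep pm)^[s + len] (some name) = (gstep pm)^[s + j] (some name) := by
    intro s
    rw [Function.iterate_add_apply, Function.iterate_add_apply]
    have h1 : (gstep pm)^[len] (some name) = (gstep pm)^[j] (some name) := heq.symm
    rw [h1]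
  intro n
  induction n using Nat.strong_induction_on with
  | _ n ih =>
    by_cases hn : n < len
    · exact hsome n hn
    · have hs := shift (n - len)
      rw [show n - len + len = n from by omega] at hs
      unfold it
      rw [hs]
      exact ih ((n - len) + j) (by omega)

theorem lookup_isSome_mem_keys (pm : List (String × Option String)) (x : String)
    (h : (List.lookup x pm).isSome) : x ∈ pm.map Prod.fst := by
  induction pm with
  | nil => simp [List.lookup] at h
  | cons hd tl ih =>
    obtain ⟨k, v⟩ := hd
    by_cases hx : x = k
    · simp [hx]
    · rw [List.lookup] at h
      have hb : (x == k) = false := by simp [hx]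
      rw [hb] at h
      simp only [List.map_cons, List.mem_cons]
      exact Or.inr (ih h)

theorem path_short (pm : List (String × Option String)) (name : String) (path : List String)
    (hch : Chainpath pm name path) (hnd : path.Nodup) : path.length ≤ pm.length + 1 := by
  have hsub : ∀ x ∈ path.dropLast, x ∈ pm.map Prod.fst := by
    intro x hx
    obtain ⟨i, hi, hxe⟩ := List.getElem_of_mem hx
    have hi' : i + 1 < path.length := by
      have h0 := hi
      simp [List.length_dropLast] at h0
      omega
    have h1 := hch i (by omega)
    have h2 := hch (i + 1) hi'
    have h3 : gstep pm (some path[i]) = some path[i + 1] := by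
      unfold it at h1 h2
      rw [Function.iterate_succ_apply'] at h2
      rw [← h1] at h2
      exact h2.symm
    have h4 : (List.lookup path[i] pm).isSome := by
      rcases hl : List.lookup path[i] pm with _ | w
      · unfold gstep at h3
        simp [hl] at h3
      · simp
    have h5 := lookup_isSome_mem_keys pm _ h4
    rw [← hxe, List.getElem_dropLast]
    exact h5
  have hnd2 : path.dropLast.Nodup := (List.dropLast_sublist path).nodup hnd
  have hc1 : path.dropLast.toFinset.card = path.dropLast.length :=
    List.toFinset_card_of_nodup hnd2
  have hc2 : path.dropLast.toFinset ⊆ (pm.map Prod.fst).toFinset := by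
    intro x hx
    exact List.mem_toFinset.mpr (hsub x (List.mem_toFinset.mp hx))
  have hc3 := Finset.card_le_card hc2
  have hc4 := List.toFinset_card_le (pm.map Prod.fst)
  have hl1 : path.dropLast.length = path.length - 1 := List.length_dropLast
  have hl2 : (pm.map Prod.fst).length = pm.length := by simp
  omega

theorem bwalk_spec (pm : List (String × Option String)) (memo : List (String × Int))
    (name : String) (hInv : MemoInv pm memo) :
    ∀ (fuel : Nat) (path : List String) (cur : Option String),
      cur = it pm path.length name →
      Chainpath pm name path →
      path.Nodup →
      pm.length + 2 ≤ fuel + path.length →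
      (bwalk pm memo fuel cur path = none → ∀ n, (it pm n name).isSome)
      ∧ (∀ curF path', bwalk pm memo fuel cur path = some (curF, path') →
          Chainpath pm name path' ∧ path'.Nodup ∧ it pm path'.length name = curF ∧
          (curF = none ∨ ∃ c v, curF = some c ∧ List.lookup c memo = some v ∧ Dies pm c v)) := by
  intro fuel
  induction fuel with
  | zero =>
    intro path cur hcur hch hnd hfuel
    have hF : False := by
      have h0 := path_short pm name path hch hnd
      omega
    exact hF.elim
  | succ fuel ih =>
    intro path cur hcur hch hnd hfuel
    cases cur with
    | none =>
      constructor
      · intro h; simp [bwalk] at h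
      · intro curF path' h
        simp only [bwalk, Option.some.injEq, Prod.mk.injEq] at h
        obtain ⟨h1, h2⟩ := h
        subst h1; subst h2
        exact ⟨hch, hnd, hcur.symm, Or.inl rfl⟩
    | some c =>
      by_cases hmem : (List.lookup c memo).isSome = true
      · constructor
        · intro h; simp [bwalk, hmem] at h
        · intro curF path' h
          simp only [bwalk, hmem, if_true, Option.some.injEq, Prod.mk.injEq] at h
          obtain ⟨h1, h2⟩ := h
          subst h1; subst h2
          obtain ⟨v, hv⟩ := Option.isSome_iff_exists.mp hmem
          exact ⟨hch, hnd, hcur.symm, Or.inr ⟨c, v, rfl, hv, hInv c v hv⟩⟩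
      · by_cases hpath : c ∈ path
        · constructor
          · intro _
            obtain ⟨j, hj, hjc⟩ := List.getElem_of_mem hpath
            have e1 : it pm j name = some c := by rw [← hch j hj, hjc]
            have e2 : it pm path.length name = some c := hcur.symm
            exact not_fin_of_repeat pm name j path.length hj (e1.trans e2.symm)
              (fun i hi => by rw [← hch i hi]; simp)
          · intro curF path' h
            simp [bwalk, hmem, hpath] at h
        · have hcur' : (List.lookup c pm).join = it pm (path ++ [c]).length name := by
            simp only [List.length_append, List.length_cons, List.length_nil]
            unfold it
            rw [Function.iterate_succ_apply']
            have h0 : (gstep pm)^[path.length] (some name) = some c := by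
              unfold it at hcur; rw [← hcur]
            rw [h0]
            rfl
          have hch' : Chainpath pm name (path ++ [c]) := by
            intro i hi
            simp only [List.length_append, List.length_cons, List.length_nil] at hi
            by_cases hilt : i < path.length
            · rw [List.getElem_append_left hilt]
              exact hch i hilt
            · have hieq : i = path.length := by omega
              subst hieq
              simpa using hcur
          have hnd' : (path ++ [c]).Nodup := by
            rw [List.nodup_append]
            refine ⟨hnd, by simp, ?_⟩
            intro a ha b hb
            rw [List.mem_singleton] at hb
            subst hb
            intro hab
            subst hab
            exact hpath ha
          have hfuel' : pm.length + 2 ≤ fuel + (path ++ [c]).length := by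
            simp only [List.length_append, List.length_cons, List.length_nil]
            omega
          have hrec := ih (path ++ [c]) ((List.lookup c pm).join) hcur' hch' hnd' hfuel'
          have hstep : bwalk pm memo (fuel + 1) (some c) path
              = bwalk pm memo fuel ((List.lookup c pm).join) (path ++ [c]) := by
            simp [bwalk, hmem, hpath]
          constructor
          · intro h
            exact hrec.1 (by rw [← hstep]; exact h)
          · intro curF path' h
            exact hrec.2 curF path' (by rw [← hstep]; exact h)

theorem bassign_lookup_notmem :
    ∀ (l : List String) (d : Int) (memo : List (String × Int)) (x : String), x ∉ l →
      List.lookup x (bassignRev l d memo).1 = List.lookup x memo := by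
  intro l
  induction l with
  | nil => intro d memo x _; rfl
  | cons node rest ih =>
    intro d memo x hx
    simp only [List.mem_cons, not_or] at hx
    rw [bassignRev, ih (d + 1) ((node, d + 1) :: memo) x hx.2]
    rw [List.lookup]
    have hb : (x == node) = false := by simp [hx.1]
    rw [hb]

theorem bassign_lookup_getElem :
    ∀ (l : List String) (d : Int) (memo : List (String × Int)) (k : Nat) (hk : k < l.length),
      l.Nodup →
      List.lookup l[k] (bassignRev l d memo).1 = some (d + (k : Int) + 1) := by
  intro l
  induction l with
  | nil => intro d memo k hk; simp at hk
  | cons node rest ih =>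
    intro d memo k hk hnd
    rw [List.nodup_cons] at hnd
    cases k with
    | zero =>
      simp only [List.getElem_cons_zero]
      rw [bassignRev, bassign_lookup_notmem rest (d + 1) ((node, d + 1) :: memo) node hnd.1]
      rw [List.lookup]
      simp
    | succ k' =>
      simp only [List.getElem_cons_succ]
      rw [bassignRev, ih (d + 1) ((node, d + 1) :: memo) k' (by simpa using hk) hnd.2]
      congr 1
      push_cast
      ring

-- everything B records after one successful walk: the exact-death value of name, the memo
-- invariant after the assignments, and the value memo' stores for name
theorem step_core (pm : List (String × Option String)) (memo : List (String × Int))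
    (hInv : MemoInv pm memo) (name : String) (path' : List String) (d0val : Int)
    (hch' : Chainpath pm name path') (hnd' : path'.Nodup) (hd0nn : 0 ≤ d0val)
    (hcont : ∀ s : Nat, ((gstep pm)^[s] (it pm path'.length name) = none ↔ d0val ≤ (s : Int))) :
    Dies pm name (d0val + (path'.length : Int)) ∧
    MemoInv pm (bassignRev path'.reverse d0val memo).1 ∧
    (path' ≠ [] → List.lookup name (bassignRev path'.reverse d0val memo).1
        = some (d0val + (path'.length : Int))) := by
  have hname : Dies pm name (d0val + (path'.length : Int)) := by
    intro t
    by_cases htl : t < path'.length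
    · constructor
      · intro hc
        rw [← hch' t htl] at hc
        simp at hc
      · intro hc
        exfalso
        have hcast : (t : Int) < (path'.length : Int) := by exact_mod_cast htl
        omega
    · have hadd := (Function.iterate_add_apply (gstep pm) (t - path'.length) path'.length (some name)).symm
      rw [show t - path'.length + path'.length = t from by omega] at hadd
      have hsplit : it pm t name = (gstep pm)^[t - path'.length] (it pm path'.length name) := by
        unfold it
        rw [← hadd]
      rw [hsplit, hcont (t - path'.length)]
      omega
  refine ⟨hname, ?_, ?_⟩
  · -- MemoInv after the assignments
    have hnode : ∀ k (hk : k < path'.length),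
        Dies pm path'[k] (d0val + ((path'.length - k : Nat) : Int)) := by
      intro k hk t
      have hrw : it pm t path'[k] = it pm (t + k) name := by
        unfold it
        rw [Function.iterate_add_apply]
        have h0 : (gstep pm)^[k] (some name) = some path'[k] := (hch' k hk).symm
        rw [h0]
      rw [hrw, hname (t + k)]
      omega
    intro x v' hx
    by_cases hxp : x ∈ path'
    · obtain ⟨k, hk, hke⟩ := List.getElem_of_mem hxp
      have hrevk : path'.reverse[path'.length - 1 - k]'(by simp; omega) = path'[k] := by
        rw [List.getElem_reverse]
        congr 1
        omega
      have hlk := bassign_lookup_getElem path'.reverse d0val memo (path'.length - 1 - k)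
        (by simp; omega) (List.nodup_reverse.mpr hnd')
      rw [hrevk, hke] at hlk
      rw [hlk] at hx
      have hveq : v' = d0val + ((path'.length - 1 - k : Nat) : Int) + 1 := by
        injection hx with hx'
        omega
      have hcast : d0val + ((path'.length - 1 - k : Nat) : Int) + 1
          = d0val + ((path'.length - k : Nat) : Int) := by omega
      rw [hveq, hcast, ← hke]
      exact hnode k hk
    · rw [bassign_lookup_notmem path'.reverse d0val memo x (by simp [hxp])] at hx
      exact hInv x v' hx
  · -- the value stored for name
    intro hne
    have hL0 : 0 < path'.length := List.length_pos_of_ne_nil hne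
    have hn0 : name = path'[0]'hL0 := by
      have h0 := hch' 0 hL0
      unfold it at h0
      simpa using h0.symm
    have hlk := bassign_lookup_getElem path'.reverse d0val memo (path'.length - 1)
      (by simp; omega) (List.nodup_reverse.mpr hnd')
    have hrev0 : path'.reverse[path'.length - 1]'(by simp; omega) = path'[0]'hL0 := by
      rw [List.getElem_reverse]
      congr 1
      omega
    rw [hrev0, ← hn0] at hlk
    rw [hlk]
    congr 1
    omega

theorem bprocess_eq (pm : List (String × Option String)) (m : Int) :
    ∀ (l : List (String × Option String)) (memo : List (String × Int)), MemoInv pm memo →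
      bprocess pm m l memo = l.any (fun kv => alive pm m kv.1) := by
  intro l
  induction l with
  | nil => intro memo _; simp [bprocess]
  | cons hd rest ih =>
    intro memo hInv
    obtain ⟨name, pval⟩ := hd
    have hw := bwalk_spec pm memo name hInv (pm.length + 2) [] (some name)
      (by simp [it]) (by intro i h; simp at h) (by simp) (by simp)
    rcases hres : bwalk pm memo (pm.length + 2) (some name) [] with _ | ⟨curF, path'⟩
    · -- cycle found: both sides true
      have halive : alive pm m name = true := hw.1 hres m.toNat
      simp only [bprocess, hres, List.any_cons, halive, Bool.true_or]
    · obtain ⟨hch', hnd', hit, hterm⟩ := hw.2 curF path' hres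
      rcases hterm with rfl | ⟨c, v, rfl, hlook, hdies⟩
      · -- walk ended at None: depth0 = 0
        have hcont : ∀ s : Nat, ((gstep pm)^[s] (it pm path'.length name) = none ↔ (0:Int) ≤ (s : Int)) := by
          intro s
          constructor
          · intro _; exact Int.natCast_nonneg s
          · intro _; rw [hit]; exact iterate_none pm s
        obtain ⟨hDies, hInv', hlkname⟩ :=
          step_core pm memo hInv name path' 0 hch' hnd' le_rfl hcont
        have hne : path' ≠ [] := by
          intro he
          subst he
          unfold it at hit
          simp at hit
        have hlk := hlkname hne
        have halive := alive_iff_dies pm m name (0 + (path'.length : Int)) hDies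
        simp only [bprocess, hres, hlk, Option.getD_some, List.any_cons, halive]
        rw [ih _ hInv']
        simp
      · -- walk ended at a memoized node c: depth0 = memo[c] = v
        have hcont : ∀ s : Nat, ((gstep pm)^[s] (it pm path'.length name) = none ↔ v ≤ (s : Int)) := by
          intro s
          rw [hit]
          exact hdies s
        obtain ⟨hDies, hInv', hlkname⟩ := step_core pm memo hInv name path' v hch' hnd'
          (by have := dies_pos pm c v hdies; omega) hcont
        have hlk : List.lookup name (bassignRev path'.reverse v memo).1
            = some (v + (path'.length : Int)) := by
          by_cases hne : path' = []
          · subst hne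
            have hcn : c = name := by
              unfold it at hit
              simpa using hit.symm
            show List.lookup name memo = some (v + ((0:Nat) : Int))
            rw [← hcn, hlook]
            norm_num
          · exact hlkname hne
        have halive := alive_iff_dies pm m name (v + (path'.length : Int)) hDies
        simp only [bprocess, hres, hlook, Option.getD_some, hlk, List.any_cons, halive]
        rw [ih _ hInv']
        by_cases hgt : m < v + (path'.length : Int)
        · simp [hgt]
        · simp [hgt]

-- ===== VERDICT (by name: the statement is the Claim_ definition above) =====
theorem exceeds_max_depth_py_spec : Claim_equal_exceeds_max_depth_py := by
  intro pm m _
  unfold Spec_exceeds_max_depth_py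
  show exceeds_max_depth_py pm m = exceeds_max_depth_py_alt pm m
  unfold exceeds_max_depth_py exceeds_max_depth_py_alt
  rw [bprocess_eq pm m pm [] (by intro x v h; simp [List.lookup] at h)]
  have hpt : ∀ kv : String × Option String, aloop pm m (some kv.1) 0 = alive pm m kv.1 :=
    fun kv => aloop_eq pm m m.toNat (some kv.1) 0 (by simp)
  simp only [hpt]
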